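-- pv_equiv track=rewrite | github.com/PolarState/CFG | cfg/cfg_utils.py | count_generations
-- ===== SOURCE A (Python) =====
-- def count_generations(start_symbol, cfg_rules):
--     """Count the total number of sentences (derivation paths) a CFG can produce.
--
--     Args:
--         start_symbol: the nonterminal to start from.
--         cfg_rules: dictionary of nonterminal -> list of production sequences.
--
--     Returns:
--         The count for the start symbol, or None if the grammar is recursive.
--     """
--     # Sentinel to detect cycles. If we encounter a symbol that is currently
--     # being computed, we know we've hit a recursive rule which means the
--     # grammar produces infinite sentences.
--     COMPUTING = object()
--     counts = {}
--
--     def compute(symbol):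
--         # If the symbol isn't a key in the grammar, it's a terminal.
--         # Terminals contribute exactly 1 to the count of any production
--         # they appear in.
--         if symbol not in cfg_rules:
--             return 1
--
--         # If we've already computed or started computing this symbol:
--         if symbol in counts:
--             # If we see the sentinel, we've found a cycle.
--             if counts[symbol] is COMPUTING:
--                 return None
--             # Otherwise return the cached count.
--             return counts[symbol]
--
--         # Mark this symbol as in-progress before recursing.
--         counts[symbol] = COMPUTING
--
--         # For each production rule of this nonterminal, the number of
--         # sentences it generates is the product of the counts of each
--         # symbol in the rule (each choice multiplies combinatorially).
--         # The total for the nonterminal is the sum across all its rules.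
--         total = 0
--         for production in cfg_rules[symbol]:
--             prod_count = 1
--             for sym in production:
--                 sym_count = compute(sym)
--                 # Propagate cycle detection upward.
--                 if sym_count is None:
--                     counts[symbol] = None
--                     return None
--                 prod_count *= sym_count
--             total += prod_count
--
--         counts[symbol] = total
--         return total
--
--     return compute(start_symbol)
-- ===== SOURCE B (Python) =====
-- def count_generations(start_symbol, cfg_rules):
--     """Count the total number of sentences a CFG can produce.
--
--     Bottom-up fixpoint saturation instead of recursive descent: repeatedly
--     solve every nonterminal whose production symbols are all terminals or
--     already-solved nonterminals.  A nonterminal left unsolved at the fixpoint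
--     (transitively) depends on a cycle, which is exactly when the grammar is
--     recursive from it, so the answer there is None.
--     """
--     if start_symbol not in cfg_rules:
--         return 1
--     solved = {}
--     progress = True
--     while progress:
--         progress = False
--         for sym in cfg_rules:
--             if sym in solved:
--                 continue
--             total = 0
--             ok = True
--             for production in cfg_rules[sym]:
--                 prod_count = 1
--                 for s in production:
--                     if s in cfg_rules:
--                         if s in solved:
--                             prod_count *= solved[s]
--                         else:
--                             ok = False
--                             break
--                 if not ok:
--                     break
--                 total += prod_count
--             if ok:
--                 solved[sym] = total
--                 progress = True
--     return solved.get(start_symbol)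
-- ===== Notes on version B (the rewrite author's own statement) =====
-- stated objective: alternative
-- what changed: A's recursive memoized depth-first descent with a COMPUTING sentinel is replaced by a non-recursive bottom-up fixpoint saturation: repeatedly solve every nonterminal whose production symbols are all terminals or already-solved keys; a nonterminal still unsolved at the fixpoint depends on a cycle, which is exactly when A propagates None.
import Mathlib
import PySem

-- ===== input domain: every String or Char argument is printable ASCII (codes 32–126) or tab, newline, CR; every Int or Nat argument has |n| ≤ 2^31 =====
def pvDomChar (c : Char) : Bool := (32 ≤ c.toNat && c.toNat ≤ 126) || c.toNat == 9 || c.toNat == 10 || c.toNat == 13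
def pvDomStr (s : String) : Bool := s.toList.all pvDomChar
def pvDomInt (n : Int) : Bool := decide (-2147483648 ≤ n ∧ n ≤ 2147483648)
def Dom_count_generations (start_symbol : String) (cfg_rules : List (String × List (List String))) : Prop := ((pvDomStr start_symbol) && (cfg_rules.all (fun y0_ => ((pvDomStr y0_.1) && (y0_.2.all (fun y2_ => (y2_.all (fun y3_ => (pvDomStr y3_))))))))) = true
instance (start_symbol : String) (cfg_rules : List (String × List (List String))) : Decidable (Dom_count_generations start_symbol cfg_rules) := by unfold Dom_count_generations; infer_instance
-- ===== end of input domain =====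

-- B replaces A's recursive memoized DFS by a bottom-up fixpoint saturation (solve each
-- nonterminal once all its production symbols are terminals or already solved; a key left
-- unsolved at the fixpoint depends on a cycle and yields none) — objective: alternative.


-- ===== PORT A =====

inductive PvCell where
  | comp : PvCell
  | done : Option Int → PvCell
deriving DecidableEq, Repr

-- inner loop of A's compute: `for sym in production`, threading the memo and
-- propagating None; `rec` is the recursive call to compute at the next fuel level
def pvGoProd (rec : String → PySem.Dict String PvCell → Option Int × PySem.Dict String PvCell) :
    List String → Int → PySem.Dict String PvCell → Option Int × PySem.Dict String PvCell
  | [], acc, m => (some acc, m)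
  | c :: cs, acc, m =>
    match rec c m with
    | (none, m') => (none, m')
    | (some u, m') => pvGoProd rec cs (acc * u) m'

-- outer loop of A's compute: `for production in cfg_rules[symbol]`
def pvGo (rec : String → PySem.Dict String PvCell → Option Int × PySem.Dict String PvCell) (s : String) :
    List (List String) → Int → PySem.Dict String PvCell → Option Int × PySem.Dict String PvCell
  | [], total, m => (some total, m.insert s (PvCell.done (some total)))
  | p :: ps, total, m =>
    match pvGoProd rec p 1 m with
    | (none, m') => (none, m'.insert s (PvCell.done none))
    | (some u, m') => pvGo rec s ps (total + u) m'

-- A's `compute(symbol)`; fuel only makes the recursion structural, it never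
-- runs out when started at (number of rules) + 1
def pvComputeA (cfg : PySem.Dict String (List (List String))) : Nat → String → PySem.Dict String PvCell → Option Int × PySem.Dict String PvCell
  | 0, _, m => (none, m)
  | f+1, s, m =>
    if cfg.contains s = false then (some 1, m)
    else
      match m.get? s with
      | some PvCell.comp => (none, m)
      | some (PvCell.done v) => (v, m)
      | none => pvGo (pvComputeA cfg f) s ((cfg.get? s).getD []) 0 (m.insert s PvCell.comp)

def count_generations (start_symbol : String) (cfg_rules : List (String × List (List String))) : Option Int :=
  let cfg := PySem.Dict.ofList cfg_rules
  (pvComputeA cfg (cfg.size + 1) start_symbol PySem.Dict.empty).1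

-- ===== PORT B =====
-- B-side helpers: the evaluation of one key over the current solved table (Source B's inner loops)
def pvEvalSym (cfg : PySem.Dict String (List (List String))) (S : PySem.Dict String Int) (c : String) : Option Int :=
  if cfg.contains c then S.get? c else some 1

def pvEvalProd (cfg : PySem.Dict String (List (List String))) (S : PySem.Dict String Int) : List String → Int → Option Int
  | [], acc => some acc
  | c :: cs, acc =>
    match pvEvalSym cfg S c with
    | none => none
    | some u => pvEvalProd cfg S cs (acc * u)

def pvEvalProds (cfg : PySem.Dict String (List (List String))) (S : PySem.Dict String Int) : List (List String) → Int → Option Int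
  | [], t => some t
  | p :: ps, t =>
    match pvEvalProd cfg S p 1 with
    | none => none
    | some u => pvEvalProds cfg S ps (t + u)

def pvEvalKey (cfg : PySem.Dict String (List (List String))) (S : PySem.Dict String Int) (k : String) : Option Int :=
  pvEvalProds cfg S ((cfg.get? k).getD []) 0

def pvPass (cfg : PySem.Dict String (List (List String))) : List (String × List (List String)) → PySem.Dict String Int → Bool → PySem.Dict String Int × Bool
  | [], S, prog => (S, prog)
  | (k, _) :: rest, S, prog =>
    if S.contains k then pvPass cfg rest S prog
    else
      match pvEvalKey cfg S k with
      | some v => pvPass cfg rest (S.insert k v) true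
      | none => pvPass cfg rest S prog

def pvSaturate (cfg : PySem.Dict String (List (List String))) : Nat → PySem.Dict String Int → PySem.Dict String Int
  | 0, S => S
  | f+1, S =>
    match pvPass cfg cfg.items S false with
    | (S', true) => pvSaturate cfg f S'
    | (S', false) => S'

def count_generations_alt (start_symbol : String) (cfg_rules : List (String × List (List String))) : Option Int :=
  let cfg := PySem.Dict.ofList cfg_rules
  if cfg.contains start_symbol = false then some 1
  else (pvSaturate cfg (cfg.size + 1) PySem.Dict.empty).get? start_symbol

-- ===== PRECONDITION & SPEC =====
def Spec_count_generations (start_symbol : String) (cfg_rules : List (String × List (List String))) (out : Option Int) : Prop := out = count_generations_alt start_symbol cfg_rules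
instance (start_symbol : String) (cfg_rules : List (String × List (List String))) (out : Option Int) : Decidable (Spec_count_generations start_symbol cfg_rules out) := by unfold Spec_count_generations; infer_instance

-- ===== CLAIM (what is proved, stated in full; the proofs are below) =====
def Claim_equal_count_generations : Prop := ∀ (start_symbol : String) (cfg_rules : List (String × List (List String))), Dom_count_generations start_symbol cfg_rules → Spec_count_generations start_symbol cfg_rules (count_generations start_symbol cfg_rules)
-- ===== LEMMAS AND PROOFS =====

-- dependency edge of the grammar: `a` is a rule key and `b` occurs in one of its productions
def PvEdge (cfg : PySem.Dict String (List (List String))) (a b : String) : Prop :=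
  ∃ ps, cfg.get? a = some ps ∧ ∃ p ∈ ps, b ∈ p

-- the solved table as B builds it: each key appended once, evaluable from the earlier entries
inductive PvBuilt (cfg : PySem.Dict String (List (List String))) : PySem.Dict String Int → Prop
  | nil : PvBuilt cfg PySem.Dict.empty
  | snoc {S k v} : PvBuilt cfg S → S.contains k = false → cfg.contains k = true →
      pvEvalKey cfg S k = some v → PvBuilt cfg (S.insert k v)

-- fixpoint: every unsolved key is blocked
def PvFix (cfg : PySem.Dict String (List (List String))) (S : PySem.Dict String Int) : Prop :=
  ∀ k, cfg.contains k = true → S.contains k = false → pvEvalKey cfg S k = none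

-- invariant of A's memo table relative to B's final solved table S
def PvMemInv (cfg : PySem.Dict String (List (List String))) (S : PySem.Dict String Int)
    (m : PySem.Dict String PvCell) : Prop :=
  ∀ k c, m.get? k = some c → cfg.contains k = true ∧ ∀ v, c = PvCell.done v → v = S.get? k

-- number of rule keys not yet present in a table (A's memo or B's solved table)
def pvMissing {ν : Type} (cfg : PySem.Dict String (List (List String))) (m : PySem.Dict String ν) : Nat :=
  (cfg.keys.filter (fun k => !(m.contains k))).length

-- A's memo evolves by adding entries and flipping comp→done; this is what one call guarantees
def PvPost (m m' : PySem.Dict String PvCell) : Prop :=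
  (∀ k c, m.get? k = some c → m'.get? k = some c) ∧
  (∀ k, m'.get? k = some PvCell.comp → m.get? k = some PvCell.comp)

lemma pvPost_refl (m : PySem.Dict String PvCell) : PvPost m m := ⟨fun _ _ h => h, fun _ h => h⟩

lemma pvPost_trans {m1 m2 m3 : PySem.Dict String PvCell} (h12 : PvPost m1 m2) (h23 : PvPost m2 m3) : PvPost m1 m3 :=
  ⟨fun k c h => h23.1 k c (h12.1 k c h), fun k h => h12.2 k (h23.2 k h)⟩

lemma pv_contains_of_get? {ν : Type} (m : PySem.Dict String ν) (k : String) (v : ν)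
    (h : m.get? k = some v) : m.contains k = true := by
  rw [PySem.Dict.contains_eq_isSome_get?, h]; rfl

lemma pv_get?_none_of_not_contains {ν : Type} (m : PySem.Dict String ν) (k : String)
    (h : m.contains k = false) : m.get? k = none := by
  rw [PySem.Dict.contains_eq_isSome_get?] at h
  exact Option.not_isSome_iff_eq_none.mp (by simp [h])

lemma pv_get?_insert_fresh {ν : Type} (S : PySem.Dict String ν) (k x : String) (v w : ν)
    (hfresh : S.contains k = false) (hx : S.get? x = some v) : (S.insert k w).get? x = some v := by
  have hxk : x ≠ k := by
    intro e; subst e; rw [pv_contains_of_get? S x v hx] at hfresh; cases hfresh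
  rw [PySem.Dict.get?_insert, if_neg hxk]; exact hx

-- evaluation under a fresh insert: successful lookups are stable
lemma pvEvalSym_mono (cfg : PySem.Dict String (List (List String))) (S : PySem.Dict String Int)
    (k : String) (w : Int) (hk : S.contains k = false) (c : String) (u : Int)
    (h : pvEvalSym cfg S c = some u) : pvEvalSym cfg (S.insert k w) c = some u := by
  unfold pvEvalSym at h ⊢
  by_cases hc : cfg.contains c = true
  · simp only [hc, if_true] at h ⊢; exact pv_get?_insert_fresh S k c u w hk h
  · simp only [eq_false_of_ne_true hc] at h ⊢; simpa using h

lemma pvEvalProd_mono (cfg : PySem.Dict String (List (List String))) (S : PySem.Dict String Int)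
    (k : String) (w : Int) (hk : S.contains k = false) :
    ∀ (p : List String) (acc u : Int), pvEvalProd cfg S p acc = some u →
      pvEvalProd cfg (S.insert k w) p acc = some u := by
  intro p
  induction p with
  | nil => intro acc u h; simpa [pvEvalProd] using h
  | cons c cs ih =>
    intro acc u h
    unfold pvEvalProd at h ⊢
    cases hs : pvEvalSym cfg S c with
    | none => rw [hs] at h; cases h
    | some z =>
      rw [hs] at h
      rw [pvEvalSym_mono cfg S k w hk c z hs]
      exact ih _ _ h

lemma pvEvalProds_mono (cfg : PySem.Dict String (List (List String))) (S : PySem.Dict String Int)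
    (k : String) (w : Int) (hk : S.contains k = false) :
    ∀ (ps : List (List String)) (t u : Int), pvEvalProds cfg S ps t = some u →
      pvEvalProds cfg (S.insert k w) ps t = some u := by
  intro ps
  induction ps with
  | nil => intro t u h; simpa [pvEvalProds] using h
  | cons p ps ih =>
    intro t u h
    unfold pvEvalProds at h ⊢
    cases hp : pvEvalProd cfg S p 1 with
    | none => rw [hp] at h; cases h
    | some z =>
      rw [hp] at h
      rw [pvEvalProd_mono cfg S k w hk p 1 z hp]
      exact ih _ _ h

lemma pvEvalKey_mono (cfg : PySem.Dict String (List (List String))) (S : PySem.Dict String Int)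
    (k : String) (w : Int) (hk : S.contains k = false) (x : String) (u : Int)
    (h : pvEvalKey cfg S x = some u) : pvEvalKey cfg (S.insert k w) x = some u := by
  unfold pvEvalKey at h ⊢
  exact pvEvalProds_mono cfg S k w hk _ _ _ h

-- a successful evaluation looked up every nonterminal of every production
lemma pvEvalProd_sub (cfg : PySem.Dict String (List (List String))) (S : PySem.Dict String Int) :
    ∀ (p : List String) (acc u : Int), pvEvalProd cfg S p acc = some u →
      ∀ c ∈ p, ∃ w, pvEvalSym cfg S c = some w := by
  intro p
  induction p with
  | nil => intro _ _ _ c hc; cases hc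
  | cons d ds ih =>
    intro acc u h c hc
    unfold pvEvalProd at h
    cases hs : pvEvalSym cfg S d with
    | none => rw [hs] at h; cases h
    | some z =>
      rw [hs] at h
      rcases List.mem_cons.mp hc with rfl | hc'
      · exact ⟨z, hs⟩
      · exact ih _ _ h c hc' 

lemma pvEvalProds_sub (cfg : PySem.Dict String (List (List String))) (S : PySem.Dict String Int) :
    ∀ (ps : List (List String)) (t u : Int), pvEvalProds cfg S ps t = some u →
      ∀ p ∈ ps, ∀ c ∈ p, ∃ w, pvEvalSym cfg S c = some w := by
  intro ps
  induction ps with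
  | nil => intro _ _ _ p hp; cases hp
  | cons q qs ih =>
    intro t u h p hp
    unfold pvEvalProds at h
    cases hq : pvEvalProd cfg S q 1 with
    | none => rw [hq] at h; cases h
    | some z =>
      rw [hq] at h
      rcases List.mem_cons.mp hp with rfl | hp'
      · exact pvEvalProd_sub cfg S p 1 z hq
      · exact ih _ _ h p hp' 

lemma pvEvalKey_children (cfg : PySem.Dict String (List (List String))) (S : PySem.Dict String Int)
    (k : String) (v : Int) (h : pvEvalKey cfg S k = some v) (ps : List (List String))
    (hps : cfg.get? k = some ps) :
    ∀ p ∈ ps, ∀ c ∈ p, cfg.contains c = true → S.contains c = true := by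
  intro p hp c hc hcfg
  unfold pvEvalKey at h
  rw [hps] at h
  rcases pvEvalProds_sub cfg S _ _ _ h p hp c hc with ⟨w, hw⟩
  unfold pvEvalSym at hw
  rw [hcfg] at hw
  simp only [if_true] at hw
  exact pv_contains_of_get? S c w hw

lemma pvBuilt_lookup (cfg : PySem.Dict String (List (List String))) (S : PySem.Dict String Int)
    (hB : PvBuilt cfg S) : ∀ k v, S.get? k = some v → pvEvalKey cfg S k = some v := by
  induction hB with
  | nil => intro k v h; rw [PySem.Dict.get?_empty] at h; cases h
  | @snoc S k' v' hB hfresh hcfg heval ih =>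
    intro k v h
    rw [PySem.Dict.get?_insert] at h
    by_cases hkk : k = k'
    · subst hkk
      rw [if_pos rfl] at h
      cases h
      exact pvEvalKey_mono cfg S k v' hfresh k v' heval
    · rw [if_neg hkk] at h
      exact pvEvalKey_mono cfg S k' v' hfresh k v (ih k v h)

lemma pv_acc_no_edge (cfg : PySem.Dict String (List (List String))) (c : String)
    (h : cfg.contains c = false) : Acc (fun b a => PvEdge cfg a b) c := by
  refine Acc.intro c (fun b hb => ?_)
  exfalso
  rcases hb with ⟨ps, hps, _⟩
  rw [pv_get?_none_of_not_contains cfg c h] at hps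
  cases hps

lemma pvBuilt_acc (cfg : PySem.Dict String (List (List String))) (S : PySem.Dict String Int)
    (hB : PvBuilt cfg S) : ∀ a, S.contains a = true → Acc (fun b a => PvEdge cfg a b) a := by
  induction hB with
  | nil => intro a ha; rw [PySem.Dict.contains_empty] at ha; cases ha
  | @snoc S k v hB hfresh hcfg heval ih =>
    intro a ha
    rw [PySem.Dict.contains_insert] at ha
    by_cases hak : a = k
    · subst hak
      refine Acc.intro a (fun b hb => ?_)
      rcases hb with ⟨ps, hps, p, hp, hbp⟩
      by_cases hcb : cfg.contains b = true
      · exact ih b (pvEvalKey_children cfg S a v heval ps hps p hp b hbp hcb)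
      · exact pv_acc_no_edge cfg b (eq_false_of_ne_true hcb)
    · have : S.contains a = true := by
        have hbeq : (a == k) = false := beq_false_of_ne hak
        rw [hbeq] at ha; simpa using ha
      exact ih a this

lemma pv_acc_irrefl {α : Type} (r : α → α → Prop) (a : α) (h : Acc r a) (hr : r a a) : False := by
  induction h with
  | intro x _ ih => exact ih x hr hr

lemma pvBuilt_no_cycle (cfg : PySem.Dict String (List (List String))) (S : PySem.Dict String Int)
    (hB : PvBuilt cfg S) (a : String) (hcyc : Relation.TransGen (PvEdge cfg) a a) :
    S.contains a = false := by
  by_cases h : S.contains a = true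
  · exfalso
    have hacc : Acc (fun b a => PvEdge cfg a b) a := pvBuilt_acc cfg S hB a h
    have hacc' : Acc (Relation.TransGen (fun b a => PvEdge cfg a b)) a := acc_transGen_iff.mpr hacc
    exact pv_acc_irrefl _ a hacc' (Relation.TransGen.swap hcyc)
  · exact eq_false_of_ne_true h

-- on a built fixpoint, evaluating a key is exactly looking it up
lemma pv_bridge (cfg : PySem.Dict String (List (List String))) (S : PySem.Dict String Int)
    (hB : PvBuilt cfg S) (hF : PvFix cfg S) (s : String) (hs : cfg.contains s = true) :
    pvEvalKey cfg S s = S.get? s := by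
  cases hS : S.get? s with
  | some v => exact pvBuilt_lookup cfg S hB s v hS
  | none =>
    apply hF s hs
    rw [PySem.Dict.contains_eq_isSome_get?, hS]; rfl

lemma pv_filter_ne_lt (L : List String) (k : String) (hk : k ∈ L) :
    (L.filter (fun x => x ≠ k)).length < L.length := by
  induction L with
  | nil => cases hk
  | cons a t ih =>
    by_cases h : a = k
    · subst h
      simp only [List.filter_cons]
      have hle : (t.filter (fun x => x ≠ a)).length ≤ t.length := List.length_filter_le _ _
      simp only [decide_not]
      simp_all
    · rcases List.mem_cons.mp hk with h' | h'
      · exact absurd h'.symm h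
      · have := ih h'
        simp only [List.filter_cons]
        by_cases hd : a ≠ k <;> simp_all

lemma pvMissing_insert_lt {ν : Type} (cfg : PySem.Dict String (List (List String)))
    (m : PySem.Dict String ν) (k : String) (w : ν) (hk : cfg.contains k = true)
    (hm : m.contains k = false) : pvMissing cfg (m.insert k w) < pvMissing cfg m := by
  unfold pvMissing
  have hmem : k ∈ cfg.keys.filter (fun x => !(m.contains x)) := by
    rw [List.mem_filter]
    exact ⟨(PySem.Dict.contains_iff_mem_keys cfg k).mp hk, by rw [hm]; rfl⟩
  have heq : cfg.keys.filter (fun x => !((m.insert k w).contains x)) =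
      (cfg.keys.filter (fun x => !(m.contains x))).filter (fun x => x ≠ k) := by
    rw [List.filter_filter]
    apply List.filter_congr
    intro x _
    rw [PySem.Dict.contains_insert]
    by_cases hxk : x = k
    · subst hxk; simp
    · have hbeq : (x == k) = false := beq_false_of_ne hxk
      simp [hbeq, hxk]
  rw [heq]
  exact pv_filter_ne_lt _ k hmem

lemma pvMissing_mono {ν : Type} (cfg : PySem.Dict String (List (List String)))
    (m m' : PySem.Dict String ν) (h : ∀ k, m.contains k = true → m'.contains k = true) :
    pvMissing cfg m' ≤ pvMissing cfg m := by
  unfold pvMissing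
  apply List.Sublist.length_le
  apply List.monotone_filter_right
  intro a ha
  cases hma : m.contains a with
  | false => simp
  | true => rw [h a hma] at ha; cases ha

lemma pvPost_missing (cfg : PySem.Dict String (List (List String))) {m m' : PySem.Dict String PvCell}
    (h : PvPost m m') : pvMissing cfg m' ≤ pvMissing cfg m := by
  apply pvMissing_mono
  intro k hk
  rw [PySem.Dict.contains_eq_isSome_get?] at hk ⊢
  cases hg : m.get? k with
  | none => rw [hg] at hk; cases hk
  | some c => rw [h.1 k c hg]; rfl

-- ===== saturation lemmas =====

lemma pvPass_flag_true (cfg : PySem.Dict String (List (List String))) :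
    ∀ (l : List (String × List (List String))) (S : PySem.Dict String Int),
      (pvPass cfg l S true).2 = true := by
  intro l
  induction l with
  | nil => intro S; rfl
  | cons q rest ih =>
    intro S
    rcases q with ⟨k, ps⟩
    unfold pvPass
    by_cases hk : S.contains k = true
    · rw [if_pos hk]; exact ih S
    · rw [if_neg hk]
      cases he : pvEvalKey cfg S k with
      | some v => exact ih _
      | none => exact ih S

lemma pvPass_no_progress (cfg : PySem.Dict String (List (List String))) :
    ∀ (l : List (String × List (List String))) (S : PySem.Dict String Int),
      (pvPass cfg l S false).2 = false →
      (pvPass cfg l S false).1 = S ∧ ∀ p ∈ l, S.contains p.1 = true ∨ pvEvalKey cfg S p.1 = none := by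
  intro l
  induction l with
  | nil => intro S _; exact ⟨rfl, fun p hp => absurd hp (List.not_mem_nil)⟩
  | cons q rest ih =>
    intro S hflag
    rcases q with ⟨k, ps⟩
    unfold pvPass at hflag ⊢
    by_cases hk : S.contains k = true
    · rw [if_pos hk] at hflag ⊢
      rcases ih S hflag with ⟨h1, h2⟩
      refine ⟨h1, fun p hp => ?_⟩
      rcases List.mem_cons.mp hp with rfl | hp'
      · exact Or.inl hk
      · exact h2 p hp'
    · rw [if_neg hk] at hflag ⊢
      cases he : pvEvalKey cfg S k with
      | some v =>
        exfalso
        rw [he] at hflag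
        rw [pvPass_flag_true cfg rest _] at hflag
        cases hflag
      | none =>
        rw [he] at hflag
        simp only at hflag ⊢
        rcases ih S hflag with ⟨h1, h2⟩
        refine ⟨h1, fun p hp => ?_⟩
        rcases List.mem_cons.mp hp with rfl | hp'
        · exact Or.inr he
        · exact h2 p hp' 

lemma pvPass_built (cfg : PySem.Dict String (List (List String))) :
    ∀ (l : List (String × List (List String))) (S : PySem.Dict String Int) (b : Bool),
      PvBuilt cfg S → (∀ p ∈ l, cfg.contains p.1 = true) →
      PvBuilt cfg (pvPass cfg l S b).1 ∧ pvMissing cfg (pvPass cfg l S b).1 ≤ pvMissing cfg S ∧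
        (b = false → (pvPass cfg l S b).2 = true → pvMissing cfg (pvPass cfg l S b).1 < pvMissing cfg S) := by
  intro l
  induction l with
  | nil =>
    intro S b hB _
    refine ⟨hB, le_refl _, fun hb hflag => ?_⟩
    subst hb
    exact absurd hflag (by simp [pvPass])
  | cons q rest ih =>
    intro S b hB hl
    rcases q with ⟨k, ps⟩
    have hl' : ∀ p ∈ rest, cfg.contains p.1 = true := fun p hp => hl p (List.mem_cons_of_mem _ hp)
    unfold pvPass
    by_cases hk : S.contains k = true
    · rw [if_pos hk]; exact ih S b hB hl'
    · rw [if_neg hk]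
      cases he : pvEvalKey cfg S k with
      | some v =>
        have hkc : cfg.contains k = true := hl (k, ps) List.mem_cons_self
        have hfresh : S.contains k = false := eq_false_of_ne_true hk
        have hB' : PvBuilt cfg (S.insert k v) := PvBuilt.snoc hB hfresh hkc he
        have hlt : pvMissing cfg (S.insert k v) < pvMissing cfg S :=
          pvMissing_insert_lt cfg S k v hkc hfresh
        rcases ih (S.insert k v) true hB' hl' with ⟨h1, h2, _⟩
        exact ⟨h1, le_trans h2 (le_of_lt hlt), fun _ _ => lt_of_le_of_lt h2 hlt⟩
      | none => exact ih S b hB hl' 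

lemma pvSat_correct (cfg : PySem.Dict String (List (List String))) :
    ∀ (f : Nat) (S : PySem.Dict String Int), PvBuilt cfg S → pvMissing cfg S < f →
      PvBuilt cfg (pvSaturate cfg f S) ∧ PvFix cfg (pvSaturate cfg f S) := by
  intro f
  induction f with
  | zero => intro S _ h; omega
  | succ f ih =>
    intro S hB hmiss
    have hall : ∀ p ∈ cfg.items, cfg.contains p.1 = true := by
      intro p hp
      exact (PySem.Dict.contains_iff_mem_keys cfg p.1).mpr (PySem.Dict.mem_keys_of_mem_items cfg hp)
    unfold pvSaturate
    cases hP : pvPass cfg cfg.items S false with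
    | mk S' flag =>
      have hPB := pvPass_built cfg cfg.items S false hB hall
      rw [hP] at hPB
      cases flag with
      | true =>
        rcases hPB with ⟨h1, _, h3⟩
        have : pvMissing cfg S' < pvMissing cfg S := h3 rfl rfl
        exact ih S' h1 (by omega)
      | false =>
        have hnp := pvPass_no_progress cfg cfg.items S (by rw [hP])
        rw [hP] at hnp
        rcases hnp with ⟨hSS, hblocked⟩
        subst hSS
        refine ⟨hPB.1, fun k hck hnk => ?_⟩
        have hkmem : k ∈ cfg.keys := (PySem.Dict.contains_iff_mem_keys cfg k).mp hck
        have : ∃ p ∈ cfg.items, p.1 = k := by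
          simpa [PySem.Dict.keys, List.mem_map] using hkmem
        rcases this with ⟨p, hp, hpk⟩
        rcases hblocked p hp with hc | hn
        · rw [hpk] at hc; rw [hc] at hnk; cases hnk
        · rw [hpk] at hn; exact hn

-- ===== the simulation of A against B's final table =====

lemma pvGoProd_spec (cfg : PySem.Dict String (List (List String))) (S : PySem.Dict String Int)
    (f : Nat) (s : String)
    (IH : ∀ (s' : String) (m : PySem.Dict String PvCell), PvMemInv cfg S m →
      (∀ k, m.get? k = some PvCell.comp → Relation.TransGen (PvEdge cfg) k s') →
      pvMissing cfg m < f →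
      (pvComputeA cfg f s' m).1 = pvEvalSym cfg S s' ∧ PvMemInv cfg S (pvComputeA cfg f s' m).2 ∧
        PvPost m (pvComputeA cfg f s' m).2) :
    ∀ (cs : List String) (acc : Int) (m : PySem.Dict String PvCell), PvMemInv cfg S m →
      (∀ k, m.get? k = some PvCell.comp → Relation.ReflTransGen (PvEdge cfg) k s) →
      pvMissing cfg m < f → (∀ c ∈ cs, PvEdge cfg s c) →
      (pvGoProd (pvComputeA cfg f) cs acc m).1 = pvEvalProd cfg S cs acc ∧
        PvMemInv cfg S (pvGoProd (pvComputeA cfg f) cs acc m).2 ∧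
        PvPost m (pvGoProd (pvComputeA cfg f) cs acc m).2 := by
  intro cs
  induction cs with
  | nil =>
    intro acc m hm _ _ _
    exact ⟨rfl, hm, pvPost_refl m⟩
  | cons c cs ih =>
    intro acc m hm hreach hmiss hcs
    have hedge : PvEdge cfg s c := hcs c List.mem_cons_self
    rcases IH c m hm (fun k hk => Relation.TransGen.tail' (hreach k hk) hedge) hmiss with ⟨h1, h2, h3⟩
    unfold pvGoProd pvEvalProd
    cases hC : pvComputeA cfg f c m with
    | mk r m' =>
      rw [hC] at h1 h2 h3
      simp only at h1 h2 h3
      rw [← h1]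
      cases r with
      | none => exact ⟨rfl, h2, h3⟩
      | some u =>
        simp only
        rcases ih (acc * u) m' h2 (fun k hk => hreach k (h3.2 k hk))
          (lt_of_le_of_lt (pvPost_missing cfg h3) hmiss)
          (fun d hd => hcs d (List.mem_cons_of_mem _ hd)) with ⟨g1, g2, g3⟩
        exact ⟨g1, g2, pvPost_trans h3 g3⟩

lemma pvGo_spec (cfg : PySem.Dict String (List (List String))) (S : PySem.Dict String Int)
    (f : Nat) (s : String)
    (IH : ∀ (s' : String) (m : PySem.Dict String PvCell), PvMemInv cfg S m →
      (∀ k, m.get? k = some PvCell.comp → Relation.TransGen (PvEdge cfg) k s') →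
      pvMissing cfg m < f →
      (pvComputeA cfg f s' m).1 = pvEvalSym cfg S s' ∧ PvMemInv cfg S (pvComputeA cfg f s' m).2 ∧
        PvPost m (pvComputeA cfg f s' m).2) :
    ∀ (ps : List (List String)) (total : Int) (m : PySem.Dict String PvCell), PvMemInv cfg S m →
      (∀ k, m.get? k = some PvCell.comp → Relation.ReflTransGen (PvEdge cfg) k s) →
      pvMissing cfg m < f → (∀ p ∈ ps, ∀ c ∈ p, PvEdge cfg s c) →
      ∃ m', PvMemInv cfg S m' ∧ PvPost m m' ∧
        pvGo (pvComputeA cfg f) s ps total m =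
          (pvEvalProds cfg S ps total, m'.insert s (PvCell.done (pvEvalProds cfg S ps total))) := by
  intro ps
  induction ps with
  | nil =>
    intro total m hm _ _ _
    exact ⟨m, hm, pvPost_refl m, rfl⟩
  | cons p ps ih =>
    intro total m hm hreach hmiss hps
    rcases pvGoProd_spec cfg S f s IH p 1 m hm hreach hmiss
      (fun c hc => hps p List.mem_cons_self c hc) with ⟨h1, h2, h3⟩
    unfold pvGo pvEvalProds
    cases hP : pvGoProd (pvComputeA cfg f) p 1 m with
    | mk r m₂ =>
      rw [hP] at h1 h2 h3
      simp only at h1 h2 h3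
      rw [← h1]
      cases r with
      | none => exact ⟨m₂, h2, h3, rfl⟩
      | some u =>
        simp only
        rcases ih (total + u) m₂ h2 (fun k hk => hreach k (h3.2 k hk))
          (lt_of_le_of_lt (pvPost_missing cfg h3) hmiss)
          (fun q hq c hc => hps q (List.mem_cons_of_mem _ hq) c hc) with ⟨m₃, g1, g2, g3⟩
        exact ⟨m₃, g1, pvPost_trans h3 g2, g3⟩

lemma pvMain (cfg : PySem.Dict String (List (List String))) (S : PySem.Dict String Int)
    (HB : PvBuilt cfg S) (HF : PvFix cfg S) :
    ∀ (f : Nat) (s : String) (m : PySem.Dict String PvCell), PvMemInv cfg S m →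
      (∀ k, m.get? k = some PvCell.comp → Relation.TransGen (PvEdge cfg) k s) →
      pvMissing cfg m < f →
      (pvComputeA cfg f s m).1 = pvEvalSym cfg S s ∧ PvMemInv cfg S (pvComputeA cfg f s m).2 ∧
        PvPost m (pvComputeA cfg f s m).2 := by
  intro f
  induction f with
  | zero => intro s m _ _ h; omega
  | succ f ihf =>
    intro s m hm hreach hmiss
    by_cases hcs : cfg.contains s = false
    · simp only [pvComputeA, hcs, if_true]
      exact ⟨by simp [pvEvalSym, hcs], hm, pvPost_refl m⟩
    · have hcontains : cfg.contains s = true := by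
        cases h : cfg.contains s
        · exact absurd h hcs
        · rfl
      cases hgs : m.get? s with
      | some cell =>
        cases cell with
        | comp =>
          have hcyc : Relation.TransGen (PvEdge cfg) s s := hreach s hgs
          have hnS : S.contains s = false := pvBuilt_no_cycle cfg S HB s hcyc
          have hgnone : S.get? s = none := pv_get?_none_of_not_contains S s hnS
          simp only [pvComputeA, hcontains, hgs]
          exact ⟨by simp [pvEvalSym, hcontains, hgnone], hm, pvPost_refl m⟩
        | done v =>
          have hv : v = S.get? s := (hm s (PvCell.done v) hgs).2 v rfl
          simp only [pvComputeA, hcontains, hgs]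
          exact ⟨by simp [pvEvalSym, hcontains, hv], hm, pvPost_refl m⟩
      | none =>
        have hps : ∃ ps, cfg.get? s = some ps := by
          rw [PySem.Dict.contains_eq_isSome_get?] at hcontains
          exact Option.isSome_iff_exists.mp hcontains
        rcases hps with ⟨ps, hps⟩
        have hmsf : m.contains s = false := by
          rw [PySem.Dict.contains_eq_isSome_get?, hgs]; rfl
        have hm1 : PvMemInv cfg S (m.insert s PvCell.comp) := by
          intro k c hk
          rw [PySem.Dict.get?_insert] at hk
          by_cases hks : k = s
          · subst hks
            rw [if_pos rfl] at hk
            cases hk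
            exact ⟨hcontains, fun v hv => by cases hv⟩
          · rw [if_neg hks] at hk
            exact hm k c hk
        have hreach1 : ∀ k, (m.insert s PvCell.comp).get? k = some PvCell.comp →
            Relation.ReflTransGen (PvEdge cfg) k s := by
          intro k hk
          rw [PySem.Dict.get?_insert] at hk
          by_cases hks : k = s
          · subst hks; exact Relation.ReflTransGen.refl
          · rw [if_neg hks] at hk
            exact (hreach k hk).to_reflTransGen
        have hmiss1 : pvMissing cfg (m.insert s PvCell.comp) < f := by
          have := pvMissing_insert_lt cfg m s PvCell.comp hcontains hmsf
          omega
        have hedges : ∀ p ∈ ps, ∀ c ∈ p, PvEdge cfg s c :=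
          fun p hp c hc => ⟨ps, hps, p, hp, hc⟩
        rcases pvGo_spec cfg S f s ihf ps 0 (m.insert s PvCell.comp) hm1 hreach1 hmiss1 hedges
          with ⟨m', hMI, hpost, heq⟩
        have hkey : pvEvalProds cfg S ps 0 = S.get? s := by
          have h1 : pvEvalKey cfg S s = pvEvalProds cfg S ps 0 := by
            unfold pvEvalKey; rw [hps]; rfl
          rw [← h1]
          exact pv_bridge cfg S HB HF s hcontains
        simp only [pvComputeA, hcontains, hgs, hps, if_false, Option.getD_some, Bool.true_eq_false]
        rw [heq]
        simp only
        refine ⟨by simp [pvEvalSym, hcontains, hkey], ?_, ?_⟩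
        · intro k c hk
          rw [PySem.Dict.get?_insert] at hk
          by_cases hks : k = s
          · subst hks
            rw [if_pos rfl] at hk
            cases hk
            exact ⟨hcontains, fun v hv => by cases hv; rw [hkey]⟩
          · rw [if_neg hks] at hk
            exact hMI k c hk
        · constructor
          · intro k c hk
            have hks : k ≠ s := by
              intro e; subst e; rw [hgs] at hk; cases hk
            have hk1 : (m.insert s PvCell.comp).get? k = some c := by
              rw [PySem.Dict.get?_insert, if_neg hks]; exact hk
            have := hpost.1 k c hk1
            rw [PySem.Dict.get?_insert, if_neg hks]
            exact this
          · intro k hk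
            rw [PySem.Dict.get?_insert] at hk
            by_cases hks : k = s
            · subst hks
              rw [if_pos rfl] at hk
              cases hk
            · rw [if_neg hks] at hk
              have := hpost.2 k hk
              rw [PySem.Dict.get?_insert, if_neg hks] at this
              exact this

-- ===== VERDICT (by name: the statement is the Claim_ definition above) =====
lemma pvMissing_empty_lt {ν : Type} (cfg : PySem.Dict String (List (List String))) :
    pvMissing cfg (PySem.Dict.empty : PySem.Dict String ν) < cfg.size + 1 := by
  unfold pvMissing
  have : ∀ k, (!(PySem.Dict.empty : PySem.Dict String ν).contains k) = true := by
    intro k; rw [PySem.Dict.contains_empty]; rfl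
  rw [List.filter_eq_self.mpr (fun a _ => this a)]
  have : cfg.keys.length = cfg.size := by
    simp [PySem.Dict.keys, PySem.Dict.size]
  omega

theorem count_generations_spec : Claim_equal_count_generations := by
  intro start_symbol cfg_rules _
  unfold Spec_count_generations
  simp only [count_generations, count_generations_alt]
  set cfg := PySem.Dict.ofList cfg_rules with hcfg
  rcases pvSat_correct cfg (cfg.size + 1) PySem.Dict.empty PvBuilt.nil (pvMissing_empty_lt cfg)
    with ⟨HB, HF⟩
  set S := pvSaturate cfg (cfg.size + 1) PySem.Dict.empty with hS
  cases hstart : cfg.contains start_symbol with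
  | false => simp [pvComputeA, hstart]
  | true =>
    have hMemInv : PvMemInv cfg S PySem.Dict.empty := by
      intro k c hk; rw [PySem.Dict.get?_empty] at hk; cases hk
    have hcomp : ∀ k, (PySem.Dict.empty : PySem.Dict String PvCell).get? k = some PvCell.comp →
        Relation.TransGen (PvEdge cfg) k start_symbol := by
      intro k hk; rw [PySem.Dict.get?_empty] at hk; cases hk
    have hMain := pvMain cfg S HB HF (cfg.size + 1) start_symbol PySem.Dict.empty hMemInv hcomp
      (pvMissing_empty_lt cfg)
    rw [hMain.1]
    simp [pvEvalSym, hstart]
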